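-- pv_equiv track=rewrite | github.com/mynameisvinn/pysearch | Indexer.py | invert_index
-- ===== SOURCE A (Python) =====
-- def invert_index(regdex):
--     """
--     takes a kv where k=fname, v=[token1, token2,...] and
--     inverts it such that k=token1, v=[fname1, fname2,...]
--     """
--     inverted_index = {}
--
--     # for each document...
--     for fname in regdex.keys():
--
--         # ...inspect its tokens
--         for token in regdex[fname]:
--
--             # if token exists, append fname
--             if token in inverted_index.keys():
--                 if fname in inverted_index[token]:
--                     pass
--                 else:
--                     inverted_index[token].append(fname)
--
--             # otherwise create a new entry
--             else:
--                 inverted_index[token] = [fname]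
--     return inverted_index
-- ===== SOURCE B (Python) =====
-- def invert_index(regdex):
--     """
--     takes a kv where k=fname, v=[token1, token2,...] and
--     inverts it such that k=token1, v=[fname1, fname2,...]
--     """
--     # pass 1: distinct tokens in first-occurrence order
--     tokens = []
--     for fname in regdex.keys():
--         for token in regdex[fname]:
--             if token not in tokens:
--                 tokens.append(token)
--     # pass 2: for each token, the documents (in regdex order) that contain it
--     return {token: [fname for fname in regdex.keys() if token in regdex[fname]]
--             for token in tokens}
-- ===== Notes on version B (the rewrite author's own statement) =====
-- stated objective: alternative
-- what changed: Instead of incrementally growing dict entries in one doc-first pass, B first collects the distinct tokens in first-occurrence order and then builds each token's doc list by a fresh scan of regdex (token-outer/doc-inner loop nest), so no entry is ever mutated after creation.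
import Mathlib
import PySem

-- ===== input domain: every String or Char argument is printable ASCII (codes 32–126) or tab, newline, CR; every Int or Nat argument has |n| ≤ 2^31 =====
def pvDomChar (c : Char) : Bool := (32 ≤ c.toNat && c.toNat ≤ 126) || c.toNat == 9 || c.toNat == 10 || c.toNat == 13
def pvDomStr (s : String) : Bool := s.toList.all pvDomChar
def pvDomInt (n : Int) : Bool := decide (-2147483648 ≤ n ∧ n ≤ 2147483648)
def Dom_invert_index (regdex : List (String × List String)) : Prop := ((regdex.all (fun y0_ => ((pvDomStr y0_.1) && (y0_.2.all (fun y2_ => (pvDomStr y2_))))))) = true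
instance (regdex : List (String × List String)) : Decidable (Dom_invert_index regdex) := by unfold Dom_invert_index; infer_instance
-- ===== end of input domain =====

-- B replaces A's single doc-first pass that mutates dict entries by two passes: collect distinct
-- tokens in first-occurrence order, then build each token's doc list by a fresh scan of regdex
-- (alternative decomposition; return value only — A mutates nothing observable).


-- ===== PORT A =====
def invert_index (regdex : List (String × List String)) : List (String × List String) :=
  (regdex.foldl
    (fun (inv : PySem.Dict String (List String)) p =>
      p.2.foldl
        (fun inv token =>
          if inv.contains token then
            if p.1 ∈ inv.getD token [] then inv
            else inv.insert token (inv.getD token [] ++ [p.1])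
          else inv.insert token [p.1])
        inv)
    PySem.Dict.empty).items

-- ===== PORT B =====
def invert_index_alt (regdex : List (String × List String)) : List (String × List String) :=
  let tokens := regdex.foldl
    (fun acc p => p.2.foldl (fun (acc : List String) t => if t ∈ acc then acc else acc ++ [t]) acc) []
  tokens.map (fun t => (t, (regdex.filter (fun p => t ∈ p.2)).map Prod.fst))

-- ===== PRECONDITION & SPEC =====
-- Pre_ excludes association lists with duplicate fnames: they do not denote a Python dict (A's
-- argument type), and the value A sees there is an artefact of dict construction (last value wins).
def Pre_invert_index (regdex : List (String × List String)) : Prop :=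
  (regdex.map Prod.fst).Nodup
instance (regdex : List (String × List String)) : Decidable (Pre_invert_index regdex) := by unfold Pre_invert_index; infer_instance
def pvWitness_invert_index : (List (String × List String)) :=
  [("a", ["x", "y"]), ("b", ["x"])]
def Spec_invert_index (regdex : List (String × List String)) (out : List (String × List String)) : Prop := out = invert_index_alt regdex
instance (regdex : List (String × List String)) (out : List (String × List String)) : Decidable (Spec_invert_index regdex out) := by unfold Spec_invert_index; infer_instance

-- ===== CLAIM (what is proved, stated in full; the proofs are below) =====
def Claim_equal_invert_index : Prop := ∀ (regdex : List (String × List String)), Dom_invert_index regdex → Pre_invert_index regdex → Spec_invert_index regdex (invert_index regdex)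

-- ===== LEMMAS AND PROOFS =====

-- A's inner (token) loop body, named for the proofs
def pvStep (fname : String) (inv : PySem.Dict String (List String)) (token : String) :
    PySem.Dict String (List String) :=
  if inv.contains token then
    if fname ∈ inv.getD token [] then inv
    else inv.insert token (inv.getD token [] ++ [fname])
  else inv.insert token [fname]

-- ordered dedup-append of a token list onto an accumulator (B's pass 1 loop body)
def pvDD (acc ts : List String) : List String :=
  ts.foldl (fun acc t => if t ∈ acc then acc else acc ++ [t]) acc

-- distinct tokens of a document list, first-occurrence order (B's pass 1)
def pvTokens (docs : List (String × List String)) : List String :=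
  docs.foldl (fun acc p => pvDD acc p.2) []

-- documents containing t, in regdex order (B's pass 2 body)
def pvDocs (docs : List (String × List String)) (t : String) : List String :=
  (docs.filter (fun p => t ∈ p.2)).map Prod.fst

lemma mem_pvDD {acc ts : List String} {t : String} :
    t ∈ pvDD acc ts ↔ t ∈ acc ∨ t ∈ ts := by
  induction ts generalizing acc with
  | nil => simp [pvDD]
  | cons x xs ih =>
    simp only [pvDD, List.foldl_cons] at *
    by_cases hx : x ∈ acc
    · rw [if_pos hx, ih, List.mem_cons]
      constructor
      · rintro (h | h) <;> tauto
      · rintro (h | rfl | h) <;> tauto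
    · rw [if_neg hx, ih, List.mem_append, List.mem_singleton, List.mem_cons]
      tauto

lemma nodup_pvDD {acc ts : List String} (h : acc.Nodup) : (pvDD acc ts).Nodup := by
  induction ts generalizing acc with
  | nil => exact h
  | cons x xs ih =>
    simp only [pvDD, List.foldl_cons]
    by_cases hx : x ∈ acc
    · simpa [pvDD, hx] using ih h
    · refine ih ?_
      rw [if_neg hx, List.nodup_append]
      exact ⟨h, List.nodup_singleton x, fun a ha b hb => by rw [List.mem_singleton.1 hb]; exact fun hax => hx (hax ▸ ha)⟩

lemma nodup_pvTokens (docs : List (String × List String)) : (pvTokens docs).Nodup := by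
  induction docs using List.reverseRecOn with
  | nil => simp [pvTokens]
  | append_singleton ds d ih =>
    simpa [pvTokens, List.foldl_append] using nodup_pvDD (acc := pvTokens ds) ih

lemma mem_pvTokens {docs : List (String × List String)} {t : String} :
    t ∈ pvTokens docs ↔ ∃ p ∈ docs, t ∈ p.2 := by
  induction docs using List.reverseRecOn with
  | nil => simp [pvTokens]
  | append_singleton ds d ih =>
    rw [pvTokens, List.foldl_append, List.foldl_cons, List.foldl_nil, mem_pvDD]
    rw [show List.foldl (fun acc p => pvDD acc p.2) [] ds = pvTokens ds from rfl, ih]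
    constructor
    · rintro (⟨p, hp, ht⟩ | ht)
      · exact ⟨p, List.mem_append_left _ hp, ht⟩
      · exact ⟨d, List.mem_append_right _ (List.mem_singleton_self d), ht⟩
    · rintro ⟨p, hp, ht⟩
      rcases List.mem_append.1 hp with hp | hp
      · exact Or.inl ⟨p, hp, ht⟩
      · rw [List.mem_singleton.1 hp] at ht; exact Or.inr ht

lemma pvDocs_subset {docs : List (String × List String)} {t f : String}
    (h : f ∈ pvDocs docs t) : f ∈ docs.map Prod.fst := by
  rcases List.mem_map.1 h with ⟨p, hp, rfl⟩
  exact List.mem_map.2 ⟨p, List.mem_of_mem_filter hp, rfl⟩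

lemma pvDocs_nil_of_not_mem {docs : List (String × List String)} {t : String}
    (h : t ∉ pvTokens docs) : pvDocs docs t = [] := by
  rw [pvDocs, List.map_eq_nil_iff, List.filter_eq_nil_iff]
  intro p hp
  simp only [decide_eq_true_eq]
  exact fun ht => h (mem_pvTokens.2 ⟨p, hp, ht⟩)

-- pointwise congruence for the if-condition inside the table map
lemma pvMapCong (M : List String) (F : String → List String) (fname : String)
    (P Q : String → Prop) [DecidablePred P] [DecidablePred Q] (h : ∀ t, P t ↔ Q t) :
    M.map (fun t => (t, F t ++ if P t then [fname] else []))
      = M.map (fun t => (t, F t ++ if Q t then [fname] else [])) := by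
  apply List.map_congr_left
  intro t _
  rw [if_congr (h t) rfl rfl]

lemma pvContains_mk_map (L : List String) (F : String → List String) (x : String) :
    ((PySem.Dict.mk (L.map (fun t => (t, F t)))).contains x) = true ↔ x ∈ L := by
  simp [PySem.Dict.contains_mk, List.any_map, List.any_eq_true, Function.comp]

lemma pvGetD_mk_map (L : List String) (F : String → List String) (x : String)
    (hL : L.Nodup) (hx : x ∈ L) :
    (PySem.Dict.mk (L.map (fun t => (t, F t)))).getD x [] = F x := by
  apply PySem.Dict.getD_of_mem_items
  · exact List.mem_map.2 ⟨x, hx, rfl⟩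
  · rw [PySem.Dict.keys_mk, List.map_map]
    simpa [Function.comp_def] using hL

-- the inner loop invariant: processing tokens ts of a fresh document fname on a state that maps
-- each token t of L to F t (plus fname already appended for t ∈ S)
lemma pvInner (fname : String) (ts : List String) (L S : List String)
    (F : String → List String)
    (hL : L.Nodup) (hF : ∀ t, fname ∉ F t) (hout : ∀ t, t ∉ L → F t = []) :
    ts.foldl (pvStep fname)
      (PySem.Dict.mk (L.map (fun t => (t, F t ++ if t ∈ S then [fname] else []))))
      = PySem.Dict.mk ((pvDD L ts).map
          (fun t => (t, F t ++ if t ∈ S ∨ t ∈ ts then [fname] else []))) := by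
  induction ts generalizing L S with
  | nil =>
    simp [pvDD]
  | cons x ts ih =>
    rw [List.foldl_cons]
    by_cases hxL : x ∈ L
    · have hcont : ((PySem.Dict.mk (L.map (fun t => (t, F t ++ if t ∈ S then [fname] else [])))).contains x) = true :=
        (pvContains_mk_map L _ x).2 hxL
      have hget : (PySem.Dict.mk (L.map (fun t => (t, F t ++ if t ∈ S then [fname] else [])))).getD x []
          = F x ++ (if x ∈ S then [fname] else []) :=
        pvGetD_mk_map L _ x hL hxL
      by_cases hxS : x ∈ S
      · -- fname already recorded for x: the step is a no-op
        have hmem : fname ∈ (PySem.Dict.mk (L.map (fun t => (t, F t ++ if t ∈ S then [fname] else [])))).getD x [] := by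
          rw [hget, if_pos hxS]
          exact List.mem_append_right _ (List.mem_singleton_self fname)
        rw [show pvStep fname (PySem.Dict.mk (L.map (fun t => (t, F t ++ if t ∈ S then [fname] else [])))) x
            = PySem.Dict.mk (L.map (fun t => (t, F t ++ if t ∈ S then [fname] else []))) by
          unfold pvStep; rw [if_pos hcont, if_pos hmem]]
        rw [ih L S hL hout]
        rw [show pvDD L (x :: ts) = pvDD L ts by simp [pvDD, hxL]]
        rw [pvMapCong (pvDD L ts) F fname (fun t => t ∈ S ∨ t ∈ ts) (fun t => t ∈ S ∨ t ∈ x :: ts)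
          (fun t => by
            constructor
            · rintro (h | h)
              · exact Or.inl h
              · exact Or.inr (List.mem_cons_of_mem x h)
            · rintro (h | h)
              · exact Or.inl h
              · rcases List.mem_cons.1 h with rfl | h
                · exact Or.inl hxS
                · exact Or.inr h)]
      · -- x seen before but fname not yet in its list: append fname in place
        have hmem : fname ∉ (PySem.Dict.mk (L.map (fun t => (t, F t ++ if t ∈ S then [fname] else [])))).getD x [] := by
          rw [hget, if_neg hxS]
          simpa using hF x
        have hstep : pvStep fname (PySem.Dict.mk (L.map (fun t => (t, F t ++ if t ∈ S then [fname] else [])))) x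
            = PySem.Dict.mk (L.map (fun t => (t, F t ++ if t ∈ x :: S then [fname] else []))) := by
          unfold pvStep
          rw [if_pos hcont, if_neg hmem]
          apply PySem.Dict.ext
          rw [PySem.Dict.items_insert_of_contains _ _ hcont, hget, if_neg hxS]
          rw [List.map_map]
          apply List.map_congr_left
          intro t htL
          by_cases htx : t = x
          · subst htx
            simp [List.mem_cons]
          · simp only [Function.comp]
            rw [if_neg (by simpa using htx)]
            rw [show (if t ∈ x :: S then [fname] else ([] : List String)) = (if t ∈ S then [fname] else []) from
              if_congr (by simp [List.mem_cons, htx]) rfl rfl]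
        rw [hstep, ih L (x :: S) hL hout]
        rw [show pvDD L (x :: ts) = pvDD L ts by simp [pvDD, hxL]]
        rw [pvMapCong (pvDD L ts) F fname (fun t => t ∈ x :: S ∨ t ∈ ts) (fun t => t ∈ S ∨ t ∈ x :: ts)
          (fun t => by simp only [List.mem_cons]; tauto)]
    · -- x is a new token: a fresh entry [fname] is appended
      have hcont : ((PySem.Dict.mk (L.map (fun t => (t, F t ++ if t ∈ S then [fname] else [])))).contains x) = false := by
        rw [Bool.eq_false_iff, Ne, pvContains_mk_map L _ x]
        exact hxL
      have hstep : pvStep fname (PySem.Dict.mk (L.map (fun t => (t, F t ++ if t ∈ S then [fname] else [])))) x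
          = PySem.Dict.mk ((L ++ [x]).map (fun t => (t, F t ++ if t ∈ x :: S then [fname] else []))) := by
        unfold pvStep
        rw [if_neg (by rw [hcont]; exact Bool.false_ne_true)]
        apply PySem.Dict.ext
        rw [PySem.Dict.items_insert_of_not_contains _ _ hcont, List.map_append]
        congr 1
        · apply List.map_congr_left
          intro t htL
          rw [show (if t ∈ x :: S then [fname] else ([] : List String)) = (if t ∈ S then [fname] else []) from
            if_congr (by
              simp only [List.mem_cons]
              exact ⟨fun h => h.elim (fun h => absurd (h ▸ htL) hxL) id, Or.inr⟩) rfl rfl]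
        · rw [List.map_singleton, hout x hxL]
          simp
      rw [hstep, ih (L ++ [x]) (x :: S)
        (by rw [List.nodup_append]
            exact ⟨hL, List.nodup_singleton x,
              fun a ha b hb => by rw [List.mem_singleton.1 hb]; exact fun hax => hxL (hax ▸ ha)⟩)
        (fun t ht => hout t (fun hmem => ht (List.mem_append_left _ hmem)))]
      rw [show pvDD L (x :: ts) = pvDD (L ++ [x]) ts by simp [pvDD, hxL]]
      rw [pvMapCong (pvDD (L ++ [x]) ts) F fname (fun t => t ∈ x :: S ∨ t ∈ ts) (fun t => t ∈ S ∨ t ∈ x :: ts)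
        (fun t => by simp only [List.mem_cons]; tauto)]

lemma pvDocs_append (ds : List (String × List String)) (d : String × List String) (t : String) :
    pvDocs (ds ++ [d]) t = pvDocs ds t ++ (if t ∈ d.2 then [d.1] else []) := by
  rw [pvDocs, pvDocs, List.filter_append, List.map_append]
  congr 1
  by_cases h : t ∈ d.2 <;> simp [h]

-- the outer loop invariant: A's fold over docs computes B's table
lemma pvOuter (docs : List (String × List String)) (h : (docs.map Prod.fst).Nodup) :
    docs.foldl (fun inv p => p.2.foldl (pvStep p.1) inv) PySem.Dict.empty
      = PySem.Dict.mk ((pvTokens docs).map (fun t => (t, pvDocs docs t))) := by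
  induction docs using List.reverseRecOn with
  | nil => rfl
  | append_singleton ds d ih =>
    rw [List.map_append, List.nodup_append] at h
    obtain ⟨hds, -, hdisj⟩ := h
    have hfd : d.1 ∉ ds.map Prod.fst := by
      intro hmem
      exact hdisj d.1 hmem (d.1) (by simp) rfl
    rw [List.foldl_append, ih hds, List.foldl_cons, List.foldl_nil]
    have hinit : (pvTokens ds).map (fun t => (t, pvDocs ds t))
        = (pvTokens ds).map (fun t => (t, pvDocs ds t ++ if t ∈ ([] : List String) then [d.1] else [])) := by
      simp
    rw [hinit, pvInner d.1 d.2 (pvTokens ds) [] (pvDocs ds) (nodup_pvTokens ds)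
      (fun t hmem => hfd (pvDocs_subset hmem))
      (fun t ht => pvDocs_nil_of_not_mem ht)]
    rw [show pvTokens (ds ++ [d]) = pvDD (pvTokens ds) d.2 by
      rw [pvTokens, List.foldl_append, List.foldl_cons, List.foldl_nil]; rfl]
    congr 1
    apply List.map_congr_left
    intro t _
    rw [pvDocs_append]
    exact congrArg (fun l => (t, pvDocs ds t ++ l)) (if_congr (by simp) rfl rfl)

-- ===== VERDICT (by name: the statement is the Claim_ definition above) =====
theorem invert_index_spec : Claim_equal_invert_index := by
  intro regdex _ hpre
  show invert_index regdex = invert_index_alt regdex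
  have h : invert_index regdex
      = (regdex.foldl (fun inv p => p.2.foldl (pvStep p.1) inv) PySem.Dict.empty).items := rfl
  rw [h, pvOuter regdex hpre]
  rfl
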